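-- pv_equiv track=rewrite | github.com/wonderwind271/probe-scaling | mdl_training.py | merge_dicts_min
-- ===== SOURCE A (Python) =====
-- def merge_dicts_min(d1: dict, d2: dict) -> dict:
--     merged = {}
--     for k in d1.keys() | d2.keys():  # union of keys
--         if k in d1 and k in d2:
--             merged[k] = min(d1[k], d2[k])
--         elif k in d1:
--             merged[k] = d1[k]
--         else:
--             merged[k] = d2[k]
--
--     return merged
-- ===== SOURCE B (Python) =====
-- def merge_dicts_min(d1: dict, d2: dict) -> dict:
--     merged = dict(d1)
--     for k, v in d2.items():
--         if k in merged:
--             merged[k] = min(merged[k], v)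
--         else:
--             merged[k] = v
--     return merged
-- ===== Notes on version B (the rewrite author's own statement) =====
-- stated objective: idiomatic
-- what changed: Replaces the union-of-keys pass with its three-way membership branch by copying d1 and folding once over d2's items, taking min on collision and inserting otherwise.
import Mathlib
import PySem

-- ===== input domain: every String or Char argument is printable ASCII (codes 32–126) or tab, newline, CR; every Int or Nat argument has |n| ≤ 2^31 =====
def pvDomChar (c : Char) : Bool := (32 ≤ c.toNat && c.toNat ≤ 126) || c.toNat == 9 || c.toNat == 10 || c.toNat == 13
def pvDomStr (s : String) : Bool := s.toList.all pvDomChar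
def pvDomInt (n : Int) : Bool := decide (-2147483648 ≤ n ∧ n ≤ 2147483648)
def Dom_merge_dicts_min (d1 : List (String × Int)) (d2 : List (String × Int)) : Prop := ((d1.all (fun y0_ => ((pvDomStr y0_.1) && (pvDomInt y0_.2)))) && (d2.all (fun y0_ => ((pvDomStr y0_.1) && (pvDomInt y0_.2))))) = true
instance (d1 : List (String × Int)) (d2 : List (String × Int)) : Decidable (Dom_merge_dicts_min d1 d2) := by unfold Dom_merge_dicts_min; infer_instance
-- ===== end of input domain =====

-- B replaces A's union-of-keys pass and three-way branch by copying d1 and folding once over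
-- d2's items (min on collision, insert otherwise); equally costly, more idiomatic.
-- Note: Python A iterates a key SET, so A's output insertion order is hash-dependent; dict
-- outputs are compared as key→value maps, and the port fixes the deterministic first-occurrence order.

-- ===== PORT A =====
def merge_dicts_min (d1 : List (String × Int)) (d2 : List (String × Int)) : List (String × Int) :=
  -- merged = {}; for k in d1.keys() | d2.keys(): …  (set union; iteration order fixed to first occurrence)
  (List.foldl (fun merged k =>
    if (PySem.Dict.mk d1).contains k && (PySem.Dict.mk d2).contains k then
      match (PySem.Dict.mk d1).get? k, (PySem.Dict.mk d2).get? k with   -- d1[k], d2[k]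
      | some a, some b => merged.insert k (min a b)
      | _, _ => merged                       -- unreachable: both keys present
    else if (PySem.Dict.mk d1).contains k then
      match (PySem.Dict.mk d1).get? k with
      | some a => merged.insert k a
      | none => merged                       -- unreachable
    else
      match (PySem.Dict.mk d2).get? k with
      | some b => merged.insert k b
      | none => merged                       -- unreachable: k came from the key union
    ) PySem.Dict.empty
    (PySem.Set.union (PySem.Set.ofList (PySem.Dict.mk d1).keys) (PySem.Dict.mk d2).keys)).items

-- ===== PORT B =====
def merge_dicts_min_alt (d1 : List (String × Int)) (d2 : List (String × Int)) : List (String × Int) :=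
  -- merged = dict(d1); for k, v in d2.items(): …
  (List.foldl (fun merged kv =>
    match merged.get? kv.1 with              -- k in merged / merged[k]
    | some old => merged.insert kv.1 (min old kv.2)
    | none => merged.insert kv.1 kv.2) (PySem.Dict.mk d1) (PySem.Dict.mk d2).items).items

-- ===== PRECONDITION & SPEC =====
-- Pre_ requires the keys inside each association list to be distinct: the Python arguments are
-- dicts, so a duplicate-key list does not represent any input A accepts.
def Pre_merge_dicts_min (d1 : List (String × Int)) (d2 : List (String × Int)) : Prop :=
  (d1.map Prod.fst).Nodup ∧ (d2.map Prod.fst).Nodup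
instance (d1 : List (String × Int)) (d2 : List (String × Int)) : Decidable (Pre_merge_dicts_min d1 d2) := by unfold Pre_merge_dicts_min; infer_instance
def pvWitness_merge_dicts_min : (List (String × Int)) × (List (String × Int)) :=
  ([("a", 3), ("b", 1)], [("b", 5), ("c", 2)])

def Spec_merge_dicts_min (d1 : List (String × Int)) (d2 : List (String × Int)) (out : List (String × Int)) : Prop := out = merge_dicts_min_alt d1 d2
instance (d1 : List (String × Int)) (d2 : List (String × Int)) (out : List (String × Int)) : Decidable (Spec_merge_dicts_min d1 d2 out) := by unfold Spec_merge_dicts_min; infer_instance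

-- ===== CLAIM (what is proved, stated in full; the proofs are below) =====
def Claim_equal_merge_dicts_min : Prop := ∀ (d1 : List (String × Int)) (d2 : List (String × Int)), Dom_merge_dicts_min d1 d2 → Pre_merge_dicts_min d1 d2 → Spec_merge_dicts_min d1 d2 (merge_dicts_min d1 d2)

-- ===== LEMMAS AND PROOFS =====

-- the value A's loop stores for a key of the union
def valA (d1 d2 : List (String × Int)) (k : String) : Int :=
  if (PySem.Dict.mk d1).contains k && (PySem.Dict.mk d2).contains k then
    min ((PySem.Dict.mk d1).getD k 0) ((PySem.Dict.mk d2).getD k 0)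
  else if (PySem.Dict.mk d1).contains k then (PySem.Dict.mk d1).getD k 0
  else (PySem.Dict.mk d2).getD k 0

lemma stepA_eq (d1 d2 : List (String × Int)) (m : PySem.Dict String Int) (k : String)
    (hk : (PySem.Dict.mk d1).contains k = true ∨ (PySem.Dict.mk d2).contains k = true) :
    (if (PySem.Dict.mk d1).contains k && (PySem.Dict.mk d2).contains k then
      match (PySem.Dict.mk d1).get? k, (PySem.Dict.mk d2).get? k with
      | some a, some b => m.insert k (min a b)
      | _, _ => m
    else if (PySem.Dict.mk d1).contains k then
      match (PySem.Dict.mk d1).get? k with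
      | some a => m.insert k a
      | none => m
    else
      match (PySem.Dict.mk d2).get? k with
      | some b => m.insert k b
      | none => m) = m.insert k (valA d1 d2 k) := by
  unfold valA
  rcases h1 : (PySem.Dict.mk d1).get? k with _ | a <;>
  rcases h2 : (PySem.Dict.mk d2).get? k with _ | b <;>
    simp [PySem.Dict.contains_eq_isSome_get?, h1, h2, PySem.Dict.getD] at hk ⊢

-- B's fold, characterised: entries of d are updated (min with d2's value when d2 has the key),
-- new keys of d2 are appended with their own values.
lemma foldB_items (d2 : List (String × Int)) (d : PySem.Dict String Int)
    (hd : d.keys.Nodup) (h2 : (d2.map Prod.fst).Nodup) :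
    (d2.foldl (fun merged kv =>
      match merged.get? kv.1 with
      | some old => merged.insert kv.1 (min old kv.2)
      | none => merged.insert kv.1 kv.2) d).items =
      d.items.map (fun p => (p.1,
        if (PySem.Dict.mk d2).contains p.1 then min p.2 ((PySem.Dict.mk d2).getD p.1 0) else p.2))
      ++ d2.filter (fun p => !(d.contains p.1)) := by
  induction d2 generalizing d with
  | nil =>
    simp [PySem.Dict.contains_mk]
  | cons kv rest ih =>
    obtain ⟨k, v⟩ := kv
    simp only [List.map] at h2
    have hknotin : k ∉ rest.map Prod.fst := (List.nodup_cons.mp h2).1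
    have h2' : (rest.map Prod.fst).Nodup := (List.nodup_cons.mp h2).2
    have hcrest : (PySem.Dict.mk rest).contains k = false := by
      simp only [PySem.Dict.contains_mk, List.any_eq_false]
      intro p hp
      simp only [beq_iff_eq]
      intro hpk; exact hknotin (hpk ▸ List.mem_map_of_mem hp)
    simp only [List.foldl_cons]
    rcases hg : d.get? k with _ | old
    · -- k not in d: insert k v
      have hc : d.contains k = false := by
        simp [PySem.Dict.contains_eq_isSome_get?, hg]
      rw [ih (d.insert k v) (PySem.Dict.nodup_keys_insert d k v hd) h2']
      rw [PySem.Dict.items_insert_of_not_contains d v hc]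
      rw [List.map_append]
      have hfk : (fun p : String × Int => (p.1,
          if (PySem.Dict.mk rest).contains p.1 then min p.2 ((PySem.Dict.mk rest).getD p.1 0) else p.2)) (k, v) = (k, v) := by
        simp [hcrest]
      have hmap : d.items.map (fun p : String × Int => (p.1,
          if (PySem.Dict.mk rest).contains p.1 then min p.2 ((PySem.Dict.mk rest).getD p.1 0) else p.2))
          = d.items.map (fun p : String × Int => (p.1,
          if (PySem.Dict.mk ((k, v) :: rest)).contains p.1 then min p.2 ((PySem.Dict.mk ((k, v) :: rest)).getD p.1 0) else p.2)) := by
        apply List.map_congr_left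
        intro p hp
        have hpk : p.1 ≠ k := by
          intro h
          have : d.contains p.1 = true := by
            rw [PySem.Dict.contains_iff_mem_keys]
            exact List.mem_map_of_mem hp
          rw [h, hc] at this; exact absurd this (by simp)
        have hco : (PySem.Dict.mk ((k, v) :: rest)).contains p.1 = (PySem.Dict.mk rest).contains p.1 := by
          simp [PySem.Dict.contains_mk, List.any_cons, (by simpa [eq_comm] using hpk : ¬ k = p.1)]
        have hgd : (PySem.Dict.mk ((k, v) :: rest)).getD p.1 0 = (PySem.Dict.mk rest).getD p.1 0 := by
          simp [PySem.Dict.getD, PySem.Dict.get?_mk_cons, (by simpa [eq_comm] using hpk : ¬ k = p.1)]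
        rw [hco, hgd]
      have hfilt : rest.filter (fun p => !((d.insert k v).contains p.1))
          = rest.filter (fun p => !(d.contains p.1)) := by
        apply List.filter_congr
        intro p hp
        have hpk : ¬ (p.1 == k) = true := by
          simp only [beq_iff_eq]
          intro h; exact hknotin (h ▸ List.mem_map_of_mem hp)
        simp [PySem.Dict.contains_insert, hpk]
      rw [hfilt, hmap]
      rw [show ((k, v) :: rest).filter (fun p => !(d.contains p.1))
            = (k, v) :: rest.filter (fun p => !(d.contains p.1)) from by
        simp [hc]]
      simp only [List.map_cons, List.map_nil, hfk, List.append_assoc, List.singleton_append]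
    · -- k in d: insert k (min old v)
      have hc : d.contains k = true := by
        simp [PySem.Dict.contains_eq_isSome_get?, hg]
      have hkeys : (d.insert k (min old v)).keys = d.keys := PySem.Dict.keys_insert_of_contains d _ hc
      rw [ih (d.insert k (min old v)) (by rw [hkeys]; exact hd) h2']
      rw [PySem.Dict.items_insert_of_contains d _ hc]
      rw [List.map_map]
      have hmap : d.items.map ((fun p : String × Int => (p.1,
          if (PySem.Dict.mk rest).contains p.1 then min p.2 ((PySem.Dict.mk rest).getD p.1 0) else p.2))
           ∘ (fun p : String × Int => if (p.1 == k) = true then (k, min old v) else p))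
          = d.items.map (fun p : String × Int => (p.1,
          if (PySem.Dict.mk ((k, v) :: rest)).contains p.1 then min p.2 ((PySem.Dict.mk ((k, v) :: rest)).getD p.1 0) else p.2)) := by
        apply List.map_congr_left
        intro p hp
        by_cases hpk : p.1 = k
        · have hpv : d.get? p.1 = some p.2 := PySem.Dict.get?_of_mem_items d hp hd
          have hold : old = p.2 := by rw [hpk] at hpv; rw [hpv] at hg; exact (Option.some_inj.mp hg).symm
          simp only [Function.comp, hpk, beq_self_eq_true, if_true]
          simp [hcrest, hold, PySem.Dict.contains_mk, List.any_cons, PySem.Dict.getD,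
            PySem.Dict.get?_mk_cons]
        · have hco : (PySem.Dict.mk ((k, v) :: rest)).contains p.1 = (PySem.Dict.mk rest).contains p.1 := by
            simp [PySem.Dict.contains_mk, List.any_cons, (by simpa [eq_comm] using hpk : ¬ k = p.1)]
          have hgd : (PySem.Dict.mk ((k, v) :: rest)).getD p.1 0 = (PySem.Dict.mk rest).getD p.1 0 := by
            simp [PySem.Dict.getD, PySem.Dict.get?_mk_cons, (by simpa [eq_comm] using hpk : ¬ k = p.1)]
          simp only [Function.comp, beq_iff_eq, hpk, if_false, hco, hgd]
      have hfilt : rest.filter (fun p => !((d.insert k (min old v)).contains p.1))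
          = rest.filter (fun p => !(d.contains p.1)) := by
        apply List.filter_congr
        intro p hp
        have hpk : ¬ (p.1 == k) = true := by
          simp only [beq_iff_eq]
          intro h; exact hknotin (h ▸ List.mem_map_of_mem hp)
        simp [PySem.Dict.contains_insert, hpk]
      rw [hfilt, hmap]
      have hfiltc : ((k, v) :: rest).filter (fun p => !(d.contains p.1))
          = rest.filter (fun p => !(d.contains p.1)) := by
        simp [hc]
      rw [hfiltc]

lemma contains_fst_map (d1 : List (String × Int)) (y : String) :
    PySem.Set.contains (List.map Prod.fst d1) y = (PySem.Dict.mk d1).contains y := by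
  rw [Bool.eq_iff_iff]
  simp only [PySem.Set.contains, PySem.Dict.contains_mk, List.contains_eq_any_beq, List.any_map,
    List.any_eq_true, Function.comp, beq_iff_eq]
  constructor
  · rintro ⟨p, hp, h⟩; exact ⟨p, hp, h.symm⟩
  · rintro ⟨p, hp, h⟩; exact ⟨p, hp, h.symm⟩

-- ===== VERDICT (by name: the statement is the Claim_ definition above) =====
theorem merge_dicts_min_spec : Claim_equal_merge_dicts_min := by
  intro d1 d2 _ hpre
  obtain ⟨h1, h2⟩ := hpre
  have h1k : (PySem.Dict.mk d1).keys.Nodup := h1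
  have h2k : (PySem.Dict.mk d2).keys.Nodup := h2
  unfold Spec_merge_dicts_min merge_dicts_min merge_dicts_min_alt
  -- the union of keys, as a concrete list
  have hunion : PySem.Set.union (PySem.Set.ofList (PySem.Dict.mk d1).keys) (PySem.Dict.mk d2).keys
      = List.map Prod.fst d1
        ++ (List.map Prod.fst d2).filter (fun y => !(PySem.Set.contains (List.map Prod.fst d1) y)) := by
    show PySem.Set.update (PySem.Set.ofList (PySem.Dict.mk d1).keys) (PySem.Dict.mk d2).keys = _
    rw [PySem.Set.update_eq_append_filter]
    simp only [PySem.Set.ofList_eq_self_of_nodup _ h1k, PySem.Set.ofList_eq_self_of_nodup _ h2k]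
    rfl
  have hnodupU : (PySem.Set.union (PySem.Set.ofList (PySem.Dict.mk d1).keys) (PySem.Dict.mk d2).keys).Nodup :=
    PySem.Set.nodup_union _ _ (PySem.Set.nodup_ofList _)
  -- A's loop body only ever runs on keys of the union; there it inserts valA
  rw [PySem.List.foldl_congr_mem _ _ (fun m k => m.insert k (valA d1 d2 k)) _ (by
    intro m k hk
    apply stepA_eq
    rw [hunion] at hk
    rcases List.mem_append.mp hk with hk1 | hk2
    · exact Or.inl ((PySem.Dict.contains_iff_mem_keys _ _).mpr hk1)
    · exact Or.inr ((PySem.Dict.contains_iff_mem_keys _ _).mpr (List.mem_filter.mp hk2).1))]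
  -- A: a fold inserting fresh distinct keys into the empty dict appends in order
  rw [PySem.Dict.items_foldl_insert_fresh _ (fun a => a) (valA d1 d2) PySem.Dict.empty
    (fun a _ => by simp [PySem.Dict.contains_empty]) (by simpa using hnodupU)]
  -- B: characterise the fold over d2
  rw [foldB_items d2 (PySem.Dict.mk d1) h1k h2]
  rw [hunion, List.map_append, List.map_map]
  have hpart1 : List.map ((fun a => (a, valA d1 d2 a)) ∘ Prod.fst) d1
      = List.map (fun p : String × Int => (p.1,
          if (PySem.Dict.mk d2).contains p.1 then min p.2 ((PySem.Dict.mk d2).getD p.1 0) else p.2)) d1 := by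
    apply List.map_congr_left
    intro p hp
    have hc1 : (PySem.Dict.mk d1).contains p.1 = true :=
      (PySem.Dict.contains_iff_mem_keys _ _).mpr (List.mem_map_of_mem hp)
    have hg1 : (PySem.Dict.mk d1).getD p.1 0 = p.2 :=
      PySem.Dict.getD_of_mem_items _ hp h1k 0
    have hc1' : (d1.any fun q => q.1 == p.1) = true := by simpa [PySem.Dict.contains_mk] using hc1
    simp only [Function.comp, valA, PySem.Dict.contains_mk, hg1, hc1', Bool.true_and, if_true]
    rfl
  have hpart2 : List.map (fun a => (a, valA d1 d2 a))
        ((List.map Prod.fst d2).filter (fun y => !(PySem.Set.contains (List.map Prod.fst d1) y)))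
      = d2.filter (fun p => !((PySem.Dict.mk d1).contains p.1)) := by
    rw [List.filter_map, List.map_map]
    have hq : (d2.filter ((fun y => !(PySem.Set.contains (List.map Prod.fst d1) y)) ∘ Prod.fst))
        = d2.filter (fun p => !((PySem.Dict.mk d1).contains p.1)) := by
      apply List.filter_congr
      intro p _
      simp only [Function.comp]
      rw [contains_fst_map]
    rw [hq]
    have : List.map ((fun a => (a, valA d1 d2 a)) ∘ Prod.fst)
          (d2.filter (fun p => !((PySem.Dict.mk d1).contains p.1)))
        = List.map id (d2.filter (fun p => !((PySem.Dict.mk d1).contains p.1))) := by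
      apply List.map_congr_left
      intro p hp
      obtain ⟨hp2, hpc⟩ := List.mem_filter.mp hp
      have hc1 : (PySem.Dict.mk d1).contains p.1 = false := by
        revert hpc; cases (PySem.Dict.mk d1).contains p.1 <;> simp
      have hc2 : (PySem.Dict.mk d2).contains p.1 = true :=
        (PySem.Dict.contains_iff_mem_keys _ _).mpr (List.mem_map_of_mem hp2)
      have hg2 : (PySem.Dict.mk d2).getD p.1 0 = p.2 :=
        PySem.Dict.getD_of_mem_items _ hp2 h2k 0
      have hc1' : (d1.any fun q => q.1 == p.1) = false := by simpa [PySem.Dict.contains_mk] using hc1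
      have hc2' : (d2.any fun q => q.1 == p.1) = true := by simpa [PySem.Dict.contains_mk] using hc2
      simp only [Function.comp, valA, PySem.Dict.contains_mk, hc1', hc2', hg2, Bool.and_true, Bool.false_eq_true, if_false, id_eq]
    rw [this, List.map_id]
  rw [hpart1, hpart2]
  rfl
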